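-- pv_equiv track=rewrite | github.com/Kaviya-0120/servetech_3.12_SDG3 | department_recommender.py | _rule_based_matching
-- ===== SOURCE A (Python) =====
-- def _rule_based_matching(symptom_text):
--     """Rule-based department matching for high-confidence cases"""
--     symptom_lower = symptom_text.lower()
--
--     # Emergency keywords (highest priority)
--     emergency_keywords = [
--         'emergency', 'urgent', 'severe chest pain', 'can\'t breathe',
--         'unconscious', 'bleeding heavily', 'overdose', 'suicide',
--         'accident', 'trauma', 'life threatening'
--     ]
--
--     for keyword in emergency_keywords:
--         if keyword in symptom_lower:
--             return 'Emergency'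
--
--     # Pregnancy-related (high priority)
--     if any(word in symptom_lower for word in ['pregnant', 'pregnancy', 'labor', 'contractions']):
--         return 'Gynecology'
--
--     # Age-specific (pediatrics)
--     if any(word in symptom_lower for word in ['baby', 'infant', 'child', 'toddler']):
--         return 'Pediatrics'
--
--     # Specific conditions
--     if 'chest pain' in symptom_lower or 'heart' in symptom_lower:
--         return 'Cardiology'
--
--     if any(word in symptom_lower for word in ['joint pain', 'back pain', 'fracture', 'sprain']):
--         return 'Orthopedics'
--
--     if any(word in symptom_lower for word in ['skin', 'rash', 'acne', 'eczema']):
--         return 'Dermatology'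
--
--     if any(word in symptom_lower for word in ['headache', 'migraine', 'seizure', 'stroke']):
--         return 'Neurology'
--
--     return None  # No rule-based match found
-- ===== SOURCE B (Python) =====
-- # One flat keyword index; collect ALL matching entries, then pick the best
-- # (lowest-priority-number) one, instead of an ordered cascade of early returns.
-- TABLE = [
--     ('emergency', 0, 'Emergency'), ('urgent', 0, 'Emergency'),
--     ('severe chest pain', 0, 'Emergency'), ("can't breathe", 0, 'Emergency'),
--     ('unconscious', 0, 'Emergency'), ('bleeding heavily', 0, 'Emergency'),
--     ('overdose', 0, 'Emergency'), ('suicide', 0, 'Emergency'),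
--     ('accident', 0, 'Emergency'), ('trauma', 0, 'Emergency'),
--     ('life threatening', 0, 'Emergency'),
--     ('pregnant', 1, 'Gynecology'), ('pregnancy', 1, 'Gynecology'),
--     ('labor', 1, 'Gynecology'), ('contractions', 1, 'Gynecology'),
--     ('baby', 2, 'Pediatrics'), ('infant', 2, 'Pediatrics'),
--     ('child', 2, 'Pediatrics'), ('toddler', 2, 'Pediatrics'),
--     ('chest pain', 3, 'Cardiology'), ('heart', 3, 'Cardiology'),
--     ('joint pain', 4, 'Orthopedics'), ('back pain', 4, 'Orthopedics'),
--     ('fracture', 4, 'Orthopedics'), ('sprain', 4, 'Orthopedics'),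
--     ('skin', 5, 'Dermatology'), ('rash', 5, 'Dermatology'),
--     ('acne', 5, 'Dermatology'), ('eczema', 5, 'Dermatology'),
--     ('headache', 6, 'Neurology'), ('migraine', 6, 'Neurology'),
--     ('seizure', 6, 'Neurology'), ('stroke', 6, 'Neurology'),
-- ]
--
-- def _rule_based_matching(symptom_text):
--     low = symptom_text.lower()
--     matches = [(prio, dept) for kw, prio, dept in TABLE if kw in low]
--     if not matches:
--         return None
--     return min(matches, key=lambda m: m[0])[1]
-- ===== Notes on version B (the rewrite author's own statement) =====
-- stated objective: alternative
-- what changed: A cascades through seven ordered rule blocks and early-returns at the first hit; B instead scans one flat keyword index, collects every matching (priority, department) pair, and aggregates with min by priority, correct because the first-firing block in A is exactly the minimum-priority match.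
import Mathlib
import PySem

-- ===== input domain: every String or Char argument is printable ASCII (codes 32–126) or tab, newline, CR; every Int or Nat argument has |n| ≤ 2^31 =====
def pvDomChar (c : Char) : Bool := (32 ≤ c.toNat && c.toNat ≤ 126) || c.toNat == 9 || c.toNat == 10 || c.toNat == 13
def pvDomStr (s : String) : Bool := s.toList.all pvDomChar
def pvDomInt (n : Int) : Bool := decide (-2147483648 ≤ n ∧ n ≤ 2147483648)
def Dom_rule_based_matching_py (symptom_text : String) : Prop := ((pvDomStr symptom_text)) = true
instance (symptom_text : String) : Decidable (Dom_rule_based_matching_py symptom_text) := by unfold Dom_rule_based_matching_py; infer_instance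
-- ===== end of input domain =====

-- B replaces A's ordered cascade of early returns by a full scan of one flat keyword
-- index followed by a min-by-priority aggregation (objective: alternative).

-- ===== PORT A =====
-- the 'for keyword in emergency_keywords: if keyword in symptom_lower: return "Emergency"' loop;
-- none = the loop fell through without returning
def pvEmergencyScan (low : String) : List String → Option String
  | [] => none
  | k :: ks => if PySem.Str.isIn k low then some "Emergency" else pvEmergencyScan low ks

def rule_based_matching_py (symptom_text : String) : Option String :=
  let symptom_lower := PySem.Str.lower symptom_text
  match pvEmergencyScan symptom_lower
      ["emergency", "urgent", "severe chest pain", "can't breathe",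
       "unconscious", "bleeding heavily", "overdose", "suicide",
       "accident", "trauma", "life threatening"] with
  | some r => some r
  | none =>
    if ["pregnant", "pregnancy", "labor", "contractions"].any (fun w => PySem.Str.isIn w symptom_lower) then
      some "Gynecology"
    else if ["baby", "infant", "child", "toddler"].any (fun w => PySem.Str.isIn w symptom_lower) then
      some "Pediatrics"
    else if PySem.Str.isIn "chest pain" symptom_lower || PySem.Str.isIn "heart" symptom_lower then
      some "Cardiology"
    else if ["joint pain", "back pain", "fracture", "sprain"].any (fun w => PySem.Str.isIn w symptom_lower) then
      some "Orthopedics"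
    else if ["skin", "rash", "acne", "eczema"].any (fun w => PySem.Str.isIn w symptom_lower) then
      some "Dermatology"
    else if ["headache", "migraine", "seizure", "stroke"].any (fun w => PySem.Str.isIn w symptom_lower) then
      some "Neurology"
    else none

-- ===== PORT B =====
-- the flat keyword index TABLE of Source B
def pvTable : List (String × Int × String) :=
  [("emergency", 0, "Emergency"), ("urgent", 0, "Emergency"),
   ("severe chest pain", 0, "Emergency"), ("can't breathe", 0, "Emergency"),
   ("unconscious", 0, "Emergency"), ("bleeding heavily", 0, "Emergency"),
   ("overdose", 0, "Emergency"), ("suicide", 0, "Emergency"),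
   ("accident", 0, "Emergency"), ("trauma", 0, "Emergency"),
   ("life threatening", 0, "Emergency"),
   ("pregnant", 1, "Gynecology"), ("pregnancy", 1, "Gynecology"),
   ("labor", 1, "Gynecology"), ("contractions", 1, "Gynecology"),
   ("baby", 2, "Pediatrics"), ("infant", 2, "Pediatrics"),
   ("child", 2, "Pediatrics"), ("toddler", 2, "Pediatrics"),
   ("chest pain", 3, "Cardiology"), ("heart", 3, "Cardiology"),
   ("joint pain", 4, "Orthopedics"), ("back pain", 4, "Orthopedics"),
   ("fracture", 4, "Orthopedics"), ("sprain", 4, "Orthopedics"),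
   ("skin", 5, "Dermatology"), ("rash", 5, "Dermatology"),
   ("acne", 5, "Dermatology"), ("eczema", 5, "Dermatology"),
   ("headache", 6, "Neurology"), ("migraine", 6, "Neurology"),
   ("seizure", 6, "Neurology"), ("stroke", 6, "Neurology")]

-- the 'if not matches: return None / return min(matches, key=lambda m: m[0])[1]' tail of Source B
-- (Python's min with a key returns the FIRST minimal element = PySem.List.min?)
def pvPick (ms : List (Int × String)) : Option String :=
  match ms with
  | [] => none
  | _ :: _ => (PySem.List.min? ms (fun m => m.1)).map (fun m => m.2)

def rule_based_matching_py_alt (symptom_text : String) : Option String :=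
  let low := PySem.Str.lower symptom_text
  let ms := (pvTable.filter (fun e => PySem.Str.isIn e.1 low)).map (fun e => e.2)
  pvPick ms

-- ===== PRECONDITION & SPEC =====
def Spec_rule_based_matching_py (symptom_text : String) (out : Option String) : Prop := out = rule_based_matching_py_alt symptom_text
instance (symptom_text : String) (out : Option String) : Decidable (Spec_rule_based_matching_py symptom_text out) := by unfold Spec_rule_based_matching_py; infer_instance

-- ===== CLAIM (what is proved, stated in full; the proofs are below) =====
def Claim_equal_rule_based_matching_py : Prop := ∀ (symptom_text : String), Dom_rule_based_matching_py symptom_text → Spec_rule_based_matching_py symptom_text (rule_based_matching_py symptom_text)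

-- ===== LEMMAS AND PROOFS =====
-- proof-only skeleton: the routes in priority order, the first-match loop over them,
-- and the flattening that rebuilds pvTable from them
def pvROUTES : List (List String × String) :=
  [(["emergency", "urgent", "severe chest pain", "can't breathe",
     "unconscious", "bleeding heavily", "overdose", "suicide",
     "accident", "trauma", "life threatening"], "Emergency"),
   (["pregnant", "pregnancy", "labor", "contractions"], "Gynecology"),
   (["baby", "infant", "child", "toddler"], "Pediatrics"),
   (["chest pain", "heart"], "Cardiology"),
   (["joint pain", "back pain", "fracture", "sprain"], "Orthopedics"),
   (["skin", "rash", "acne", "eczema"], "Dermatology"),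
   (["headache", "migraine", "seizure", "stroke"], "Neurology")]

def pvRouteLoop (low : String) : List (List String × String) → Option String
  | [] => none
  | (ks, d) :: rest =>
    if ks.any (fun k => PySem.Str.isIn k low) then some d else pvRouteLoop low rest

def pvMkTable (i : Int) : List (List String × String) → List (String × Int × String)
  | [] => []
  | (ks, d) :: rest => ks.map (fun k => (k, i, d)) ++ pvMkTable (i + 1) rest

-- A's early-return keyword loop returns 'Emergency' iff some keyword occurs.
theorem pvEmergencyScan_eq (low : String) (ks : List String) :
    pvEmergencyScan low ks =
      if ks.any (fun k => PySem.Str.isIn k low) then some "Emergency" else none := by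
  induction ks with
  | nil => rfl
  | cons k ks ih =>
    simp only [pvEmergencyScan, List.any_cons, ih]
    simp only [Bool.or_eq_true]
    split_ifs <;> tauto

-- every priority in pvMkTable i rs is ≥ i
theorem pvMkTable_key_ge : ∀ (rs : List (List String × String)) (i : Int),
    ∀ e ∈ pvMkTable i rs, i ≤ e.2.1 := by
  intro rs
  induction rs with
  | nil => intro i e he; simp [pvMkTable] at he
  | cons r rest ih =>
    intro i e he
    obtain ⟨ks, d⟩ := r
    simp only [pvMkTable, List.mem_append, List.mem_map] at he
    rcases he with ⟨k, _, rfl⟩ | h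
    · simp
    · have := ih (i + 1) e h
      omega

-- the running-min fold keeps its accumulator when nothing later is strictly smaller
theorem pvFoldlMin_keep (f : Option (Int × String) → (Int × String) → Option (Int × String))
    (a : Int × String) (t : List (Int × String))
    (hf : ∀ y ∈ t, f (some a) y = some a) :
    t.foldl f (some a) = some a := by
  induction t with
  | nil => rfl
  | cons y ys ih =>
    rw [List.foldl_cons, hf y (List.mem_cons_self ..)]
    exact ih fun z hz => hf z (List.mem_cons_of_mem _ hz)

theorem pvMin?_head (key : Int × String → Int) (x : Int × String) (t : List (Int × String))
    (h : ∀ y ∈ t, key x ≤ key y) :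
    PySem.List.min? (x :: t) key = some x := by
  simp only [PySem.List.min?, List.foldl_cons]
  refine pvFoldlMin_keep _ x t fun y hy => ?_
  have hxy : ¬ key y < key x := not_lt.mpr (h y hy)
  simp [hxy]

-- filter + min over the flattened table = first-match loop over the routes
theorem pvPick_mkTable (low : String) : ∀ (rs : List (List String × String)) (i : Int),
    pvPick (((pvMkTable i rs).filter (fun e => PySem.Str.isIn e.1 low)).map (fun e => e.2))
      = pvRouteLoop low rs := by
  intro rs
  induction rs with
  | nil => intro i; rfl
  | cons r rest ih =>
    intro i
    obtain ⟨ks, d⟩ := r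
    simp only [pvMkTable, List.filter_append, List.map_append, pvRouteLoop]
    rw [List.filter_map]
    have hcomp : ((fun e : String × Int × String => PySem.Str.isIn e.1 low) ∘ fun k => (k, i, d))
        = fun k => PySem.Str.isIn k low := rfl
    rw [hcomp]
    rcases hks : ks.filter (fun k => PySem.Str.isIn k low) with _ | ⟨k, ks'⟩
    · have hany : ks.any (fun k => PySem.Str.isIn k low) = false := by
        refine List.any_eq_false.mpr fun a ha hp => ?_
        have : a ∈ ks.filter (fun k => PySem.Str.isIn k low) := List.mem_filter.mpr ⟨ha, hp⟩
        rw [hks] at this; cases this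
      rw [hany]
      simpa using ih (i + 1)
    · have hk : k ∈ ks.filter (fun k => PySem.Str.isIn k low) := by
        rw [hks]; exact List.mem_cons_self ..
      have hany : ks.any (fun k => PySem.Str.isIn k low) = true :=
        List.any_eq_true.mpr ⟨k, (List.mem_filter.mp hk).1, (List.mem_filter.mp hk).2⟩
      rw [hany, if_pos rfl]
      simp only [List.map_cons, List.map_map, List.cons_append, pvPick]
      rw [pvMin?_head]
      · rfl
      intro y hy
      rcases List.mem_append.mp hy with h1 | h2
      · obtain ⟨_, _, rfl⟩ := List.mem_map.mp h1; exact le_refl _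
      · obtain ⟨e, he, rfl⟩ := List.mem_map.mp h2
        have := pvMkTable_key_ge rest (i + 1) e (List.mem_filter.mp he).1
        simpa using by omega

-- ===== VERDICT (by name: the statement is the Claim_ definition above) =====
theorem rule_based_matching_py_spec : Claim_equal_rule_based_matching_py := by
  intro s _
  have htbl : pvTable = pvMkTable 0 pvROUTES := by decide
  have hB : rule_based_matching_py_alt s = pvRouteLoop (PySem.Str.lower s) pvROUTES := by
    simp only [rule_based_matching_py_alt, htbl]
    exact pvPick_mkTable (PySem.Str.lower s) pvROUTES 0
  simp only [Spec_rule_based_matching_py, hB, rule_based_matching_py, pvROUTES, pvRouteLoop,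
    pvEmergencyScan_eq, List.any_cons, List.any_nil, Bool.or_false]
  split_ifs <;> rfl
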